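-- pv_equiv track=rewrite | github.com/DJamesVersion/loaprogs | phonology_decoder.py | decode_puzzle
-- ===== SOURCE A (Python) =====
-- def decode_puzzle(encoded_text, decoding_map):
--     """
--     Decodes the phonology-encoded text back into the original alphabet.
--     Handles both tightly-packed ciphers and space-separated phrases.
--     """
--     decoded_text = []
--
--     # 1. Identify all valid phoneme words and sort them by length (descending)
--     # This is crucial for 'tightly packed' strings (like in Puzzle 3) to prevent
--     # prematurely matching a shorter phoneme that is a prefix of a longer one.
--     phonemes = sorted(decoding_map.keys(), key=len, reverse=True)
--
--     i = 0
--     n = len(encoded_text)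
--
--     while i < n:
--         # Check for numbers or symbols that were not encoded (e.g., '2', '/', '_')
--         if not encoded_text[i].isalpha() and encoded_text[i] not in ["'", ]:
--             decoded_text.append(encoded_text[i])
--             i += 1
--             continue
--
--         # Look for the longest possible phoneme match
--         match_found = False
--         for phoneme in phonemes:
--             # Check if the substring at current position 'i' matches a known phoneme
--             if encoded_text.startswith(phoneme, i):
--                 original_letter = decoding_map[phoneme]
--
--                 # Special handling for capitalized T in 'Tahkmahnelle'
--                 if phoneme == 'Tahkmahnelle':
--                     decoded_text.append('T')
--                 else:
--                     decoded_text.append(original_letter)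
--
--                 # Advance the pointer by the length of the matched phoneme
--                 i += len(phoneme)
--                 match_found = True
--                 break
--
--         if not match_found:
--             # If no match is found, it's likely a separator or an apostrophe in c'illiatnah
--             # We must handle the apostrophe carefully, as it's part of the phoneme.
--             # If we encounter an unrecognized character, treat it as a literal and advance.
--             # This handles cases where the original encoder might have left some characters unencoded.
--
--             # For robustness, we check if the remaining text starts with a known,
--             # partial phoneme (e.g., 'c' or 'h' or 'y') and if the next char is an apostrophe.
--             if encoded_text[i] in ['c', 'h', 'y'] and i + 1 < n and encoded_text[i+1] == "'":
--                  # This should ideally be handled by the phoneme matching above,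
--                  # but as a fallback for incomplete matching:
--                 decoded_text.append(encoded_text[i])
--                 i += 1
--
--             else:
--                 # Append the character as is, assuming it's a preserved symbol/digit
--                 decoded_text.append(encoded_text[i])
--                 i += 1
--
--     return "".join(decoded_text)
-- ===== SOURCE B (Python) =====
-- def decode_puzzle(encoded_text, decoding_map):
--     # Hash-indexed greedy longest-match: one dict with 'Tahkmahnelle'->'T' folded in,
--     # then at each position probe slices of decreasing length (bounded by the longest
--     # phoneme) instead of scanning the whole sorted phoneme list.
--     eff = {}
--     maxlen = 0
--     for k, v in decoding_map.items():
--         eff[k] = 'T' if k == 'Tahkmahnelle' else v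
--         if len(k) > maxlen:
--             maxlen = len(k)
--     out = []
--     n = len(encoded_text)
--     i = 0
--     while i < n:
--         c = encoded_text[i]
--         if c.isalpha() or c == "'":
--             L = min(maxlen, n - i)
--             while L > 0 and encoded_text[i:i+L] not in eff:
--                 L -= 1
--             if L > 0:
--                 out.append(eff[encoded_text[i:i+L]])
--                 i += L
--                 continue
--         out.append(c)
--         i += 1
--     return "".join(out)
-- ===== Notes on version B (the rewrite author's own statement) =====
-- stated objective: faster
-- what changed: Instead of sorting all phoneme keys by length and scanning the whole sorted list at every text position, B builds one hash dict (with the 'Tahkmahnelle'->'T' special case folded into the values) and at each position probes slices of decreasing length bounded by the longest key, so the per-position cost drops from O(k*L) string comparisons to O(maxlen) hash lookups.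
-- outside the precondition, e.g. on decode_puzzle('5', {'': 'x'}): A returns '5', B returns '5'
import Mathlib
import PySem

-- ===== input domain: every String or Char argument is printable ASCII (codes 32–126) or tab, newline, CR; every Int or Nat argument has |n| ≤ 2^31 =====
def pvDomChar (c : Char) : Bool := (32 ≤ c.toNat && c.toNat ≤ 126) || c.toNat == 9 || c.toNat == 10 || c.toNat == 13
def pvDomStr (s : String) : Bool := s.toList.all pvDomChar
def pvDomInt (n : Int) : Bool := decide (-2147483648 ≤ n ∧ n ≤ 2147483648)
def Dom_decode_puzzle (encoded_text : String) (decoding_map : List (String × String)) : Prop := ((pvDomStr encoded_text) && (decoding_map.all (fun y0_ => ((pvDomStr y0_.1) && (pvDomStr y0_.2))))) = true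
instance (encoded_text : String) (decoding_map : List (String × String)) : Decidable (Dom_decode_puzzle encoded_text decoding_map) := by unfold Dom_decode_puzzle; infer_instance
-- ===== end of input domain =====

-- B replaces A's sorted-phoneme-list scan at every position by one hash dict probed with
-- slices of decreasing length (longest match first), objective: faster.
-- ===== PORT A =====
-- decoding_map[phoneme]: dict lookup = first match (the "" default is unreachable: it is
-- only called with phoneme ∈ keys)
def pyDictGet (dm : List (String × String)) (k : String) : String :=
  ((dm.find? (fun q => q.1 == k)).map (fun q => q.2)).getD ""

-- the 'while i < n' loop of A; one fuel unit per iteration (fuel s.length + 1 is enough: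
-- under Pre_ every iteration advances i by at least 1)
def decodeA_loop (s : List Char) (phonemes : List String) (dm : List (String × String)) :
    Nat → Nat → List Char → List Char
  | 0, _, acc => acc
  | fuel+1, i, acc =>
    if h : i < s.length then
      if !PySem.Chars.isalpha s[i] && !(s[i] == '\'') then
        decodeA_loop s phonemes dm fuel (i+1) (acc ++ [s[i]])
      else
        -- 'for phoneme in phonemes: if encoded_text.startswith(phoneme, i): …; break'
        match phonemes.find? (fun p => PySem.Chars.startswith (s.drop i) p.toList) with
        | some p =>
          decodeA_loop s phonemes dm fuel (i + p.toList.length)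
            (acc ++ (if p == "Tahkmahnelle" then "T" else pyDictGet dm p).toList)
        | none =>
          if (s[i] == 'c' || s[i] == 'h' || s[i] == 'y') && decide (i + 1 < s.length) && (s[i+1]? == some '\'') then
            decodeA_loop s phonemes dm fuel (i+1) (acc ++ [s[i]])
          else
            decodeA_loop s phonemes dm fuel (i+1) (acc ++ [s[i]])
    else acc

def decode_puzzle (encoded_text : String) (decoding_map : List (String × String)) : String :=
  let s := encoded_text.toList
  -- sorted(decoding_map.keys(), key=len, reverse=True)
  let phonemes := PySem.List.sorted (decoding_map.map (fun q => q.1)) (fun k => k.toList.length) true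
  String.ofList (decodeA_loop s phonemes decoding_map (s.length + 1) 0 [])

-- ===== PORT B =====
-- 'while L > 0 and encoded_text[i:i+L] not in eff: L -= 1' ; the slice xs[i:i+L] is
-- (s.drop i).take L (PySem.List.slice_natCast_add)
def findL (s : List Char) (eff : PySem.Dict String String) (i : Nat) : Nat → Nat
  | 0 => 0
  | L+1 => if eff.contains (String.ofList ((s.drop i).take (L+1))) then L+1 else findL s eff i L

def decodeB_loop (s : List Char) (eff : PySem.Dict String String) (maxlen : Nat) :
    Nat → Nat → List Char → List Char
  | 0, _, acc => acc
  | fuel+1, i, acc =>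
    if h : i < s.length then
      if PySem.Chars.isalpha s[i] || s[i] == '\'' then
        if 0 < findL s eff i (min maxlen (s.length - i)) then
          -- eff[encoded_text[i:i+L]]; the "" default is unreachable (L > 0 means membership)
          decodeB_loop s eff maxlen fuel (i + findL s eff i (min maxlen (s.length - i)))
            (acc ++ (eff.getD (String.ofList ((s.drop i).take (findL s eff i (min maxlen (s.length - i))))) "").toList)
        else
          decodeB_loop s eff maxlen fuel (i+1) (acc ++ [s[i]])
      else
        decodeB_loop s eff maxlen fuel (i+1) (acc ++ [s[i]])
    else acc

def decode_puzzle_alt (encoded_text : String) (decoding_map : List (String × String)) : String :=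
  let s := encoded_text.toList
  -- one pass over the items builds eff (with 'Tahkmahnelle' ↦ "T" folded in) and maxlen
  let st := decoding_map.foldl
    (fun st q => (st.1.insert q.1 (if q.1 == "Tahkmahnelle" then "T" else q.2),
                  if q.1.toList.length > st.2 then q.1.toList.length else st.2))
    (PySem.Dict.empty, 0)
  String.ofList (decodeB_loop s st.1 st.2 (s.length + 1) 0 [])

-- ===== PRECONDITION & SPEC =====
-- Pre_ excludes decoding maps containing the empty string as a key: on those A loops forever
-- whenever some alphabetic character has no non-empty phoneme match, and where A does return
-- the "" key is never used.  The key-distinctness conjunct is vacuous for inputs coming from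
-- Python (decoding_map is a dict, whose keys are necessarily distinct).
def Pre_decode_puzzle (encoded_text : String) (decoding_map : List (String × String)) : Prop :=
  (decoding_map.map Prod.fst).Nodup ∧ ∀ q ∈ decoding_map, q.1 ≠ ""
instance (encoded_text : String) (decoding_map : List (String × String)) : Decidable (Pre_decode_puzzle encoded_text decoding_map) := by unfold Pre_decode_puzzle; infer_instance

def pvWitness_decode_puzzle : String × (List (String × String)) :=
  ("abc2a'", [("ab", "q"), ("c", "r"), ("a", "s")])

def Spec_decode_puzzle (encoded_text : String) (decoding_map : List (String × String)) (out : String) : Prop := out = decode_puzzle_alt encoded_text decoding_map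
instance (encoded_text : String) (decoding_map : List (String × String)) (out : String) : Decidable (Spec_decode_puzzle encoded_text decoding_map out) := by unfold Spec_decode_puzzle; infer_instance

-- ===== CLAIM (what is proved, stated in full; the proofs are below) =====
def Claim_equal_decode_puzzle : Prop := ∀ (encoded_text : String) (decoding_map : List (String × String)), Dom_decode_puzzle encoded_text decoding_map → Pre_decode_puzzle encoded_text decoding_map → Spec_decode_puzzle encoded_text decoding_map (decode_puzzle encoded_text decoding_map)

-- ===== LEMMAS AND PROOFS =====

-- the two accumulators of B's build loop, separated (PySem.List.foldl_prod_mk)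
def effFold (dm : List (String × String)) : PySem.Dict String String :=
  dm.foldl (fun d q => d.insert q.1 (if q.1 == "Tahkmahnelle" then "T" else q.2)) PySem.Dict.empty

def maxFold (dm : List (String × String)) : Nat :=
  dm.foldl (fun m q => if q.1.toList.length > m then q.1.toList.length else m) 0

theorem eff_items (dm : List (String × String)) (hnd : (dm.map Prod.fst).Nodup) :
    (effFold dm).items = dm.map (fun q => (q.1, if q.1 == "Tahkmahnelle" then "T" else q.2)) := by
  have h := PySem.Dict.items_foldl_insert_fresh (l := dm) (k := Prod.fst)
      (v := fun q => if q.1 == "Tahkmahnelle" then "T" else q.2) (d := PySem.Dict.empty)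
      (fun a _ => PySem.Dict.contains_empty _) hnd
  simpa [effFold] using h

theorem eff_keys (dm : List (String × String)) (hnd : (dm.map Prod.fst).Nodup) :
    (effFold dm).keys = dm.map Prod.fst := by
  simp only [PySem.Dict.keys, eff_items dm hnd, List.map_map]
  rfl

theorem eff_contains (dm : List (String × String)) (hnd : (dm.map Prod.fst).Nodup) (x : String) :
    (effFold dm).contains x = true ↔ x ∈ dm.map Prod.fst := by
  rw [PySem.Dict.contains_iff_mem_keys, eff_keys dm hnd]

theorem eff_getD (dm : List (String × String)) (hnd : (dm.map Prod.fst).Nodup)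
    {q : String × String} (hq : q ∈ dm) :
    (effFold dm).getD q.1 "" = if q.1 == "Tahkmahnelle" then "T" else q.2 := by
  apply PySem.Dict.getD_of_mem_items
  · rw [eff_items dm hnd]
    exact List.mem_map_of_mem hq
  · rw [eff_keys dm hnd]; exact hnd

theorem maxFold_ub (dm : List (String × String)) : ∀ q ∈ dm, q.1.toList.length ≤ maxFold dm := by
  intro q hq
  have hcongr : maxFold dm = dm.foldl (fun m q => max m q.1.toList.length) 0 := by
    unfold maxFold
    exact PySem.List.foldl_congr_mem dm _ _ 0 (fun acc x _ => by split <;> omega)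
  rw [hcongr]
  exact (PySem.List.le_foldl_max_nat dm (fun q => q.1.toList.length) 0).2 q hq

theorem findL_eq_zero (s : List Char) (eff : PySem.Dict String String) (i : Nat) :
    ∀ D, (∀ L, 0 < L → L ≤ D → eff.contains (String.ofList ((s.drop i).take L)) = false) →
      findL s eff i D = 0
  | 0, _ => rfl
  | D+1, h => by
    simp only [findL]
    rw [h (D+1) (Nat.succ_pos D) le_rfl]
    simpa using findL_eq_zero s eff i D (fun L h1 h2 => h L h1 (Nat.le_trans h2 (Nat.le_succ D)))

theorem findL_eq (s : List Char) (eff : PySem.Dict String String) (i : Nat) :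
    ∀ D Lp, 0 < Lp → Lp ≤ D →
      eff.contains (String.ofList ((s.drop i).take Lp)) = true →
      (∀ L, Lp < L → L ≤ D → eff.contains (String.ofList ((s.drop i).take L)) = false) →
      findL s eff i D = Lp
  | 0, Lp, h0, hle, _, _ => by omega
  | D+1, Lp, h0, hle, hc, hmax => by
    simp only [findL]
    by_cases hEq : Lp = D+1
    · subst hEq; rw [hc]; simp
    · rw [hmax (D+1) (by omega) le_rfl]
      simpa using findL_eq s eff i D Lp h0 (by omega) hc (fun L a b => hmax L a (by omega))

theorem string_len_pos (p : String) (h : p ≠ "") : 0 < p.toList.length := by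
  rcases Nat.eq_zero_or_pos p.toList.length with h0 | h0
  · exfalso; apply h
    have : p.toList = [] := List.length_eq_zero_iff.mp h0
    have := congrArg String.ofList this
    rwa [String.ofList_toList] at this
  · exact h0

theorem main_loop_eq (s : List Char) (dm : List (String × String))
    (hnd : (dm.map Prod.fst).Nodup) (hne : ∀ q ∈ dm, q.1 ≠ "")
    (fuel : Nat) : ∀ (i : Nat) (acc : List Char),
    decodeA_loop s (PySem.List.sorted (dm.map (fun q => q.1)) (fun k => k.toList.length) true) dm fuel i acc
      = decodeB_loop s (effFold dm) (maxFold dm) fuel i acc := by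
  set phonemes := PySem.List.sorted (dm.map (fun q => q.1)) (fun k => k.toList.length) true with hph
  induction fuel with
  | zero => intro i acc; rfl
  | succ fuel ih =>
    intro i acc
    simp only [decodeA_loop, decodeB_loop]
    by_cases hlt : i < s.length
    · rw [dif_pos hlt, dif_pos hlt]
      by_cases hc : (PySem.Chars.isalpha s[i] || s[i] == '\'') = true
      · -- alphabetic or apostrophe: A scans the sorted phoneme list, B probes slices
        have hA : (!PySem.Chars.isalpha s[i] && !(s[i] == '\'')) = false := by
          cases hA1 : PySem.Chars.isalpha s[i] <;> cases hA2 : (s[i] == '\'') <;> simp_all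
        rw [hA, if_neg (by simp), if_pos hc]
        rcases hfind : phonemes.find? (fun p => PySem.Chars.startswith (s.drop i) p.toList) with _ | p
        · -- no phoneme matches: B's probe always fails
          rw [hfind]
          have hnone := List.find?_eq_none.mp hfind
          have hz : findL s (effFold dm) i (min (maxFold dm) (s.length - i)) = 0 := by
            apply findL_eq_zero
            intro L hL0 hLD
            by_contra hcc
            have hmem : String.ofList ((s.drop i).take L) ∈ dm.map Prod.fst :=
              (eff_contains dm hnd _).mp (Bool.of_not_eq_false hcc)
            have hk : (String.ofList ((s.drop i).take L)) ∈ phonemes := by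
              rw [hph, PySem.List.mem_sorted]; exact hmem
            apply hnone _ hk
            simp only [PySem.Chars.startswith_iff, String.toList_ofList]
            exact List.take_prefix L (s.drop i)
          rw [hz]
          simp only [Nat.lt_irrefl, if_false, ite_self]
          exact ih (i+1) (acc ++ [s[i]])
        · -- a phoneme matches; p is the first in the length-descending sorted order
          rw [hfind]
          have hpred := List.find?_some hfind
          have hpre : p.toList <+: s.drop i := (PySem.Chars.startswith_iff _ _).mp hpred
          have hpK : p ∈ dm.map Prod.fst := by
            have := List.mem_of_find?_eq_some hfind
            rw [hph, PySem.List.mem_sorted] at this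
            simpa using this
          obtain ⟨q0, hq0, hq0p⟩ : ∃ q ∈ dm, q.1 = p := by simpa using hpK
          -- maximality of p's length among matching keys
          obtain ⟨-, as, bs, hsplit, has⟩ := List.find?_eq_some_iff_append.mp hfind
          have hpair := PySem.List.sorted_pairwise_rev (dm.map (fun q => q.1)) (fun k => k.toList.length)
          rw [← hph, hsplit] at hpair
          have hmaxlen : ∀ k, k ∈ dm.map Prod.fst →
              PySem.Chars.startswith (s.drop i) k.toList = true → k.toList.length ≤ p.toList.length := by
            intro k hkK hkpred
            have hkph : k ∈ phonemes := by rw [hph, PySem.List.mem_sorted]; simpa using hkK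
            rw [hsplit] at hkph
            rcases List.mem_append.mp hkph with hk1 | hk2
            · exact absurd hkpred (by simpa using has k hk1)
            · rcases List.mem_cons.mp hk2 with rfl | hk3
              · exact le_rfl
              · exact (List.pairwise_cons.mp (List.pairwise_append.mp hpair).2.1).1 k hk3
          have h0 : 0 < p.toList.length := string_len_pos p (hq0p ▸ hne q0 hq0)
          have hslice : (s.drop i).take p.toList.length = p.toList :=
            (List.prefix_iff_eq_take.mp hpre).symm
          have hLpD : p.toList.length ≤ min (maxFold dm) (s.length - i) := by
            have h1 : p.toList.length ≤ maxFold dm := hq0p ▸ maxFold_ub dm q0 hq0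
            have h2 : p.toList.length ≤ s.length - i := by
              have := hpre.length_le
              simpa [List.length_drop] using this
            omega
          have hcont : (effFold dm).contains (String.ofList ((s.drop i).take p.toList.length)) = true := by
            rw [hslice, String.ofList_toList]
            exact (eff_contains dm hnd p).mpr hpK
          have hmax : ∀ L, p.toList.length < L → L ≤ min (maxFold dm) (s.length - i) →
              (effFold dm).contains (String.ofList ((s.drop i).take L)) = false := by
            intro L h1 h2
            by_contra hcc
            have hmem : String.ofList ((s.drop i).take L) ∈ dm.map Prod.fst :=
              (eff_contains dm hnd _).mp (Bool.of_not_eq_false hcc)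
            have hlen : ((s.drop i).take L).length = L := by
              rw [List.length_take, List.length_drop]; omega
            have := hmaxlen _ hmem (by
              simp only [PySem.Chars.startswith_iff, String.toList_ofList]
              exact List.take_prefix L (s.drop i))
            rw [String.toList_ofList, hlen] at this
            omega
          have hfl : findL s (effFold dm) i (min (maxFold dm) (s.length - i)) = p.toList.length :=
            findL_eq s (effFold dm) i _ _ h0 hLpD hcont hmax
          rw [hfl, if_pos h0, hslice, String.ofList_toList]
          -- the appended pieces agree
          have hval : (effFold dm).getD p "" = (if p == "Tahkmahnelle" then "T" else pyDictGet dm p) := by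
            rcases hfq : dm.find? (fun q => q.1 == p) with _ | q1
            · exfalso
              exact (List.find?_eq_none.mp hfq) q0 hq0 (by simp [hq0p])
            · have hq1p : q1.1 = p := by simpa using List.find?_some hfq
              have hq1 : q1 ∈ dm := List.mem_of_find?_eq_some hfq
              have := eff_getD dm hnd hq1
              rw [hq1p] at this
              rw [this]
              simp [pyDictGet, hfq]
          rw [hval]
          exact ih (i + p.toList.length) _
      · -- neither alphabetic nor apostrophe: both append the literal character
        have hA : (!PySem.Chars.isalpha s[i] && !(s[i] == '\'')) = true := by
          cases hA1 : PySem.Chars.isalpha s[i] <;> cases hA2 : (s[i] == '\'') <;> simp_all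
        rw [hA, if_pos rfl, if_neg hc]
        exact ih (i+1) (acc ++ [s[i]])
    · rw [dif_neg hlt, dif_neg hlt]

-- ===== VERDICT (by name: the statement is the Claim_ definition above) =====
theorem decode_puzzle_spec : Claim_equal_decode_puzzle := by
  intro t dm _ hPre
  unfold Spec_decode_puzzle decode_puzzle decode_puzzle_alt
  rw [PySem.List.foldl_prod_mk
    (fun (d : PySem.Dict String String) (q : String × String) =>
      d.insert q.1 (if q.1 == "Tahkmahnelle" then "T" else q.2))
    (fun (m : Nat) (q : String × String) =>
      if q.1.toList.length > m then q.1.toList.length else m) dm PySem.Dict.empty 0]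
  exact congrArg String.ofList (main_loop_eq t.toList dm hPre.1 hPre.2 _ 0 [])
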